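-- pv_equiv track=rewrite | github.com/danjelito/pemilu-dki-2019 | src/module.py | get_element_cum_count
-- ===== SOURCE A (Python) =====
-- def get_element_cum_count(input_list: list) -> list:
--     """Get a list of tuples containing the element and the cumulative count.
--
--     Args:
--         input_list (list): list containing input.
--
--     Returns:
--         list: list containing tuple of (element, cum_count).
--     """
--     output_list = []
--     element_count = {}
--
--     for item in input_list:
--         if item not in element_count:
--             element_count[item] = 1
--         else:
--             element_count[item] += 1
--         output_list.append((item, element_count[item]))
--
--     return output_list
-- ===== SOURCE B (Python) =====
-- def get_element_cum_count(input_list: list) -> list: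
--     """Get a list of tuples containing the element and the cumulative count."""
--     return [(item, input_list[: i + 1].count(item))
--             for i, item in enumerate(input_list)]
-- ===== Notes on version B (the rewrite author's own statement) =====
-- stated objective: alternative
-- what changed: Replaces the stateful running-count dict with a stateless prefix rescan: for each index i the cumulative count is recomputed as input_list[:i+1].count(item), so no mutable counter is maintained.
import Mathlib
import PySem

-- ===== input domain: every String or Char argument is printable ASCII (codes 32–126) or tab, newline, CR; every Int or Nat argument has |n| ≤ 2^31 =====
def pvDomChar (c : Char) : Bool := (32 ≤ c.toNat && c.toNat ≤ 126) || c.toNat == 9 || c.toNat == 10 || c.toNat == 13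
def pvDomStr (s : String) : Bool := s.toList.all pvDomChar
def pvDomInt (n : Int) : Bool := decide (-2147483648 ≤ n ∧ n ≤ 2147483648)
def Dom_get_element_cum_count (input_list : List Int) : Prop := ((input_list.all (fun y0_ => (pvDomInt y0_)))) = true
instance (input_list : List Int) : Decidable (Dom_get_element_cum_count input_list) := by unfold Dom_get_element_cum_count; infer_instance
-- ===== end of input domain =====

-- B replaces A's running-count dict with a stateless prefix rescan (count within input_list[:i+1]); alternative decomposition, not faster.


-- ===== PORT A =====
-- loop with a running-count dict element_count; output pairs appended one by one
def get_element_cum_count (input_list : List Int) : List (Int × Int) :=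
  (input_list.foldl
    (fun (st : List (Int × Int) × PySem.Dict Int Int) item =>
      let ec := if st.2.contains item = false
                then st.2.insert item 1
                else st.2.modify item 0 (· + 1)
      (st.1 ++ [(item, ec.getD item 0)], ec))
    ([], PySem.Dict.empty)).1

-- ===== PORT B =====
-- comprehension over enumerate: the cumulative count is recomputed as the count of item in the slice input_list[:i+1]
def get_element_cum_count_alt (input_list : List Int) : List (Int × Int) :=
  (PySem.List.enumerate input_list 0).map
    (fun p => (p.2, (PySem.List.count (PySem.List.slice input_list none (some (p.1 + 1))) p.2 : Int)))

-- ===== PRECONDITION & SPEC =====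
def Spec_get_element_cum_count (input_list : List Int) (out : List (Int × Int)) : Prop := out = get_element_cum_count_alt input_list
instance (input_list : List Int) (out : List (Int × Int)) : Decidable (Spec_get_element_cum_count input_list out) := by unfold Spec_get_element_cum_count; infer_instance

-- ===== CLAIM (what is proved, stated in full; the proofs are below) =====
def Claim_equal_get_element_cum_count : Prop := ∀ (input_list : List Int), Dom_get_element_cum_count input_list → Spec_get_element_cum_count input_list (get_element_cum_count input_list)

-- ===== LEMMAS AND PROOFS =====

-- reference function: cumulative-count pairs of l after an already-processed prefix p
def pvCum (p : List Int) : List Int → List (Int × Int)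
  | [] => []
  | x :: xs => (x, (p.count x : Int) + 1) :: pvCum (p ++ [x]) xs

lemma altB_go (l : List Int) : ∀ (p : List Int),
    (PySem.List.enumerate l (p.length : Int)).map
      (fun q => (q.2, (PySem.List.count (PySem.List.slice (p ++ l) none (some (q.1 + 1))) q.2 : Int)))
    = pvCum p l := by
  induction l with
  | nil => intro p; rfl
  | cons x xs ih =>
    intro p
    rw [PySem.List.enumerate_cons, List.map_cons, pvCum]
    have h1 : ((p.length : Int) + 1) = (((p ++ [x]).length : Nat) : Int) := by
      simp
    rw [h1, List.append_cons, ih (p ++ [x])]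
    congr 1
    rw [PySem.List.slice_to_natCast, List.take_left' rfl, PySem.List.count_eq]
    push_cast [List.count_append]
    simp

lemma loopA_go (l : List Int) : ∀ (p : List Int) (acc : List (Int × Int)) (d : PySem.Dict Int Int),
    (∀ x, d.getD x 0 = (p.count x : Int)) →
    (∀ x, d.contains x = decide (x ∈ p)) →
    (l.foldl
      (fun (st : List (Int × Int) × PySem.Dict Int Int) item =>
        let ec := if st.2.contains item = false
                  then st.2.insert item 1
                  else st.2.modify item 0 (· + 1)
        (st.1 ++ [(item, ec.getD item 0)], ec))
      (acc, d)).1 = acc ++ pvCum p l := by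
  induction l with
  | nil => intro p acc d _ _; simp [pvCum]
  | cons x xs ih =>
    intro p acc d hget hcont
    rw [List.foldl_cons]
    by_cases hc : d.contains x = false
    · -- item not yet seen: x ∉ p
      have hxp : x ∉ p := by
        have := hcont x; rw [hc] at this; simpa using this.symm
      have hcnt0 : p.count x = 0 := List.count_eq_zero.mpr hxp
      simp only [hc, if_true]
      rw [ih (p ++ [x]) _ (d.insert x 1)
        (by
          intro y
          rw [PySem.Dict.getD_insert]
          by_cases hyx : y = x
          · subst hyx; simp [List.count_append, hcnt0]
          · simp [hyx, hget y, List.count_append,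
              (by simpa using Ne.symm hyx : ¬ x = y)])
        (by
          intro y
          rw [PySem.Dict.contains_insert, hcont y]
          by_cases hyx : y = x <;> simp [hyx])]
      rw [pvCum, PySem.Dict.getD_insert_self, hcnt0]
      simp
    · -- item already counted
      have hc' : d.contains x = true := by simpa using hc
      simp only [hc', Bool.true_eq_false, if_false]
      rw [ih (p ++ [x]) _ (d.modify x 0 (· + 1))
        (by
          intro y
          rw [PySem.Dict.getD_modify]
          by_cases hyx : y = x
          · subst hyx; simp [List.count_append, hget y]
          · simp [hyx, hget y, List.count_append,
              (by simpa using Ne.symm hyx : ¬ x = y)])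
        (by
          intro y
          rw [PySem.Dict.contains_modify, hcont y]
          by_cases hyx : y = x <;> simp [hyx])]
      rw [pvCum, PySem.Dict.getD_modify_self, hget x]
      simp

lemma portA_eq_pvCum (l : List Int) : get_element_cum_count l = pvCum [] l := by
  unfold get_element_cum_count
  rw [loopA_go l [] [] PySem.Dict.empty (by intro x; simp) (by intro x; simp)]
  simp

lemma portB_eq_pvCum (l : List Int) : get_element_cum_count_alt l = pvCum [] l := by
  unfold get_element_cum_count_alt
  have := altB_go l []
  simpa using this

-- ===== VERDICT (by name: the statement is the Claim_ definition above) =====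
theorem get_element_cum_count_spec : Claim_equal_get_element_cum_count := by
  intro input_list _
  unfold Spec_get_element_cum_count
  rw [portA_eq_pvCum, portB_eq_pvCum]
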